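-- pv_equiv track=rewrite | github.com/CVB115/breau_backend | protocol_generator/goal_matcher.py | score_recipe_against_goals
-- ===== SOURCE A (Python) =====
-- from collections import defaultdict
--
-- GOAL_TAG_WEIGHTS = {
--     "increase body": {"body", "syrupy", "heavy"},
--     "syrupy body": {"syrupy", "thick", "heavy"},
--     "increase florality": {"floral", "delicate", "aromatic"},
--     "reduce bitterness": {"bitterness", "astringent", "dry"},
--     "increase sweetness": {"sweet", "fruit-forward", "candied"},
--     "winey profile": {"grape", "winey", "ferment", "boozy"},
--     "caramelized": {"caramel", "jammy", "sweet", "cooked fruit"},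
--     "balance cup": {"balanced", "round", "approachable"}
-- }
--
-- def score_recipe_against_goals(goals: list[str]) -> dict:
--     """
--     Score each recipe based on overlap between goal tags and recipe tags.
--     Returns a dictionary mapping recipe name → score.
--     """
--     goal_tags = set()
--     for goal in goals:
--         for tag_set in GOAL_TAG_WEIGHTS.values():
--             for tag in tag_set:
--                 if tag in goal.lower():
--                     goal_tags.add(tag)
--
--     scores = defaultdict(int)
--
--     for recipe_name, tags in GOAL_TAG_WEIGHTS.items():
--         match_score = len(goal_tags.intersection(tags))
--         if match_score > 0:
--             scores[recipe_name] = match_score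
--
--     return dict(scores)
-- ===== SOURCE B (Python) =====
-- GOAL_TAG_WEIGHTS = {
--     "increase body": {"body", "syrupy", "heavy"},
--     "syrupy body": {"syrupy", "thick", "heavy"},
--     "increase florality": {"floral", "delicate", "aromatic"},
--     "reduce bitterness": {"bitterness", "astringent", "dry"},
--     "increase sweetness": {"sweet", "fruit-forward", "candied"},
--     "winey profile": {"grape", "winey", "ferment", "boozy"},
--     "caramelized": {"caramel", "jammy", "sweet", "cooked fruit"},
--     "balance cup": {"balanced", "round", "approachable"}
-- }
--
-- def score_recipe_against_goals(goals: list[str]) -> dict: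
--     """Score each recipe by how many of its tags occur as substrings of some goal."""
--     lowered = [g.lower() for g in goals]
--     scores = {}
--     for recipe_name, tags in GOAL_TAG_WEIGHTS.items():
--         match_score = sum(1 for t in tags if any(t in g for g in lowered))
--         if match_score > 0:
--             scores[recipe_name] = match_score
--     return scores
-- ===== Notes on version B (the rewrite author's own statement) =====
-- stated objective: simpler
-- what changed: Drops A's precomputed shared goal-tag set and the set-intersection per recipe; B lowercases the goals once and, per recipe, directly counts tags that occur as a substring of some goal, inserting only positive scores into a plain dict.
import Mathlib
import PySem

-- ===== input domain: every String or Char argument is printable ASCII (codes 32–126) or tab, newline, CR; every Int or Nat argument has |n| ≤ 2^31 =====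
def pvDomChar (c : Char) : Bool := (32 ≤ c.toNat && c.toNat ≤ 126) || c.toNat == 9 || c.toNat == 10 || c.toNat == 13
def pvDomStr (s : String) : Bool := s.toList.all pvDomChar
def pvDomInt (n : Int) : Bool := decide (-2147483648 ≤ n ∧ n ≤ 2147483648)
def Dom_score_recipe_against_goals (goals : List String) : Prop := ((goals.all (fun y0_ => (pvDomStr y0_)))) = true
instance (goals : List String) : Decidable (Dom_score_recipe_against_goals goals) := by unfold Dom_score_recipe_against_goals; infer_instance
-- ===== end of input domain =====

-- B replaces A's shared precomputed goal-tag set + per-recipe set intersection by a direct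
-- per-recipe substring count over the once-lowercased goals (objective: simpler).

-- GOAL_TAG_WEIGHTS: recipe name → its tag set (tag sets written as their literal element lists;
-- only their cardinality-after-matching is ever used, so hash order is irrelevant)
def pvWeights : List (String × List String) :=
  [("increase body", ["body", "syrupy", "heavy"]),
   ("syrupy body", ["syrupy", "thick", "heavy"]),
   ("increase florality", ["floral", "delicate", "aromatic"]),
   ("reduce bitterness", ["bitterness", "astringent", "dry"]),
   ("increase sweetness", ["sweet", "fruit-forward", "candied"]),
   ("winey profile", ["grape", "winey", "ferment", "boozy"]),
   ("caramelized", ["caramel", "jammy", "sweet", "cooked fruit"]),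
   ("balance cup", ["balanced", "round", "approachable"])]

-- ===== PORT A =====
def score_recipe_against_goals (goals : List String) : List (String × Int) :=
  let goal_tags : PySem.Set String :=
    goals.foldl (fun gt goal =>
      pvWeights.foldl (fun gt p =>
        p.2.foldl (fun gt tag =>
          if PySem.Str.isIn tag (PySem.Str.lower goal) then PySem.Set.add gt tag else gt) gt) gt)
      PySem.Set.empty
  let scores : PySem.Dict String Int :=
    pvWeights.foldl (fun scores p =>
      let match_score : Int := ((PySem.Set.inter goal_tags p.2).length : Int)
      if match_score > 0 then scores.insert p.1 match_score else scores)
      PySem.Dict.empty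
  scores.items

-- ===== PORT B =====
def score_recipe_against_goals_alt (goals : List String) : List (String × Int) :=
  let lowered : List String := goals.map PySem.Str.lower
  pvWeights.foldl (fun scores p =>
    let match_score : Int :=
      ((p.2.filter (fun t => lowered.any (fun g => PySem.Str.isIn t g))).length : Int)
    if match_score > 0 then scores ++ [(p.1, match_score)] else scores) []

-- ===== PRECONDITION & SPEC =====
def Spec_score_recipe_against_goals (goals : List String) (out : List (String × Int)) : Prop := out = score_recipe_against_goals_alt goals
instance (goals : List String) (out : List (String × Int)) : Decidable (Spec_score_recipe_against_goals goals out) := by unfold Spec_score_recipe_against_goals; infer_instance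

-- ===== CLAIM (what is proved, stated in full; the proofs are below) =====
def Claim_equal_score_recipe_against_goals : Prop := ∀ (goals : List String), Dom_score_recipe_against_goals goals → Spec_score_recipe_against_goals goals (score_recipe_against_goals goals)

-- ===== LEMMAS AND PROOFS =====

-- conditional add of each element of L into a set: membership characterisation and Nodup
theorem mem_foldl_addIf (c : String → Bool) (L : List String) (s : PySem.Set String) (x : String) :
    x ∈ L.foldl (fun s t => if c t then PySem.Set.add s t else s) s ↔ x ∈ s ∨ (x ∈ L ∧ c x = true) := by
  induction L generalizing s with
  | nil => simp
  | cons a L ih =>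
    simp only [List.foldl_cons, ih]
    by_cases h : c a = true
    · simp only [h, if_true, PySem.Set.mem_add, List.mem_cons]
      constructor
      · rintro ((hx | rfl) | ⟨hl, hc⟩)
        · exact Or.inl hx
        · exact Or.inr ⟨Or.inl rfl, h⟩
        · exact Or.inr ⟨Or.inr hl, hc⟩
      · rintro (hx | ⟨rfl | hl, hc⟩)
        · exact Or.inl (Or.inl hx)
        · exact Or.inl (Or.inr rfl)
        · exact Or.inr ⟨hl, hc⟩
    · simp only [h, List.mem_cons]
      constructor
      · rintro (hx | ⟨hl, hc⟩)
        · exact Or.inl hx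
        · exact Or.inr ⟨Or.inr hl, hc⟩
      · rintro (hx | ⟨rfl | hl, hc⟩)
        · exact Or.inl hx
        · exact absurd hc h
        · exact Or.inr ⟨hl, hc⟩

theorem nodup_foldl_addIf (c : String → Bool) (L : List String) (s : PySem.Set String) (hs : s.Nodup) :
    (L.foldl (fun s t => if c t then PySem.Set.add s t else s) s).Nodup := by
  induction L generalizing s with
  | nil => exact hs
  | cons a L ih =>
    simp only [List.foldl_cons]
    by_cases h : c a = true <;> simp [h]
    · exact ih _ (PySem.Set.nodup_add _ _ hs)
    · exact ih _ hs

-- one goal's pass over all of pvWeights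
theorem mem_weights_pass (c : String → Bool) (W : List (String × List String)) (s : PySem.Set String) (x : String) :
    x ∈ W.foldl (fun s p => p.2.foldl (fun s t => if c t then PySem.Set.add s t else s) s) s
      ↔ x ∈ s ∨ ((∃ p ∈ W, x ∈ p.2) ∧ c x = true) := by
  induction W generalizing s with
  | nil => simp
  | cons p W ih =>
    simp only [List.foldl_cons, ih, mem_foldl_addIf]
    constructor
    · rintro ((h | ⟨h1, h2⟩) | ⟨⟨q, hq, hxq⟩, hc⟩)
      · exact Or.inl h
      · exact Or.inr ⟨⟨p, by simp, h1⟩, h2⟩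
      · exact Or.inr ⟨⟨q, by simp [hq], hxq⟩, hc⟩
    · rintro (h | ⟨⟨q, hq, hxq⟩, hc⟩)
      · exact Or.inl (Or.inl h)
      · rcases List.mem_cons.mp hq with h' | h'
        · exact Or.inl (Or.inr ⟨h' ▸ hxq, hc⟩)
        · exact Or.inr ⟨⟨q, h', hxq⟩, hc⟩

theorem nodup_weights_pass (c : String → Bool) (W : List (String × List String)) (s : PySem.Set String) (hs : s.Nodup) :
    (W.foldl (fun s p => p.2.foldl (fun s t => if c t then PySem.Set.add s t else s) s) s).Nodup := by
  induction W generalizing s with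
  | nil => exact hs
  | cons p W ih => exact ih _ (nodup_foldl_addIf _ _ _ hs)

-- the whole goal_tags loop
theorem mem_goal_tags (goals : List String) (s : PySem.Set String) (x : String) :
    x ∈ goals.foldl (fun gt goal =>
          pvWeights.foldl (fun gt p =>
            p.2.foldl (fun gt tag =>
              if PySem.Str.isIn tag (PySem.Str.lower goal) then PySem.Set.add gt tag else gt) gt) gt) s
      ↔ x ∈ s ∨ ((∃ p ∈ pvWeights, x ∈ p.2)
                  ∧ goals.any (fun g => PySem.Str.isIn x (PySem.Str.lower g)) = true) := by
  induction goals generalizing s with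
  | nil => simp
  | cons g goals ih =>
    simp only [List.foldl_cons, ih, mem_weights_pass, List.any_cons, Bool.or_eq_true]
    constructor
    · rintro ((h | ⟨hb, hc⟩) | ⟨hb, hd⟩)
      · exact Or.inl h
      · exact Or.inr ⟨hb, Or.inl hc⟩
      · exact Or.inr ⟨hb, Or.inr hd⟩
    · rintro (h | ⟨hb, hc | hd⟩)
      · exact Or.inl (Or.inl h)
      · exact Or.inl (Or.inr ⟨hb, hc⟩)
      · exact Or.inr ⟨hb, hd⟩

theorem nodup_goal_tags (goals : List String) (s : PySem.Set String) (hs : s.Nodup) :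
    (goals.foldl (fun gt goal =>
        pvWeights.foldl (fun gt p =>
          p.2.foldl (fun gt tag =>
            if PySem.Str.isIn tag (PySem.Str.lower goal) then PySem.Set.add gt tag else gt) gt) gt) s).Nodup := by
  induction goals generalizing s with
  | nil => exact hs
  | cons g goals ih => exact ih _ (nodup_weights_pass _ _ _ hs)

-- two Nodup lists with the same members have the same length
theorem length_eq_of_nodup_of_mem_iff {α : Type} [DecidableEq α] (a b : List α)
    (ha : a.Nodup) (hb : b.Nodup) (h : ∀ x, x ∈ a ↔ x ∈ b) : a.length = b.length :=
  ((List.perm_ext_iff_of_nodup ha hb).mpr h).length_eq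

-- |set.intersection(tags)| counted from the tags side
theorem inter_length_eq (s : PySem.Set String) (tags : List String)
    (hs : s.Nodup) (ht : tags.Nodup) :
    (PySem.Set.inter s tags).length = (tags.filter (fun t => decide (t ∈ s))).length := by
  apply length_eq_of_nodup_of_mem_iff _ _ (PySem.Set.nodup_inter _ _ hs) (ht.filter _)
  intro x
  simp [PySem.Set.mem_inter, And.comm]

-- pulling the accumulator out of an append-if fold
theorem foldl_appendIf_acc {a b : Type} (c : a -> Prop) [DecidablePred c] (v : a -> b)
    (W : List a) (acc : List b) :
    W.foldl (fun out x => if c x then out ++ [v x] else out) acc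
      = acc ++ W.foldl (fun out x => if c x then out ++ [v x] else out) [] := by
  induction W generalizing acc with
  | nil => simp
  | cons x W ih =>
    simp only [List.foldl_cons]
    by_cases h : c x
    · rw [if_pos h, if_pos h, ih (acc ++ [v x]), ih ([] ++ [v x])]
      simp
    · rw [if_neg h, if_neg h]
      exact ih acc

-- A's conditional-insert loop over distinct fresh keys builds exactly B's appended list
theorem items_foldl_insertIf (f : String × List String → Int) (W : List (String × List String))
    (d : PySem.Dict String Int) (hnd : (W.map Prod.fst).Nodup)
    (hfresh : ∀ p ∈ W, d.contains p.1 = false) :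
    (W.foldl (fun sc p => if f p > 0 then sc.insert p.1 (f p) else sc) d).items
      = d.items ++ W.foldl (fun out p => if f p > 0 then out ++ [(p.1, f p)] else out) [] := by
  induction W generalizing d with
  | nil => simp
  | cons p W ih =>
    simp only [List.map_cons, List.nodup_cons] at hnd
    have hfp : d.contains p.1 = false := hfresh p (by simp)
    simp only [List.foldl_cons]
    by_cases h : f p > 0
    · rw [if_pos h, if_pos h,
        ih (d.insert p.1 (f p)) hnd.2
          (by
            intro q hq
            rw [PySem.Dict.contains_insert]
            have hne : q.1 ≠ p.1 := fun he => hnd.1 (he ▸ List.mem_map_of_mem hq)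
            simp [hne, hfresh q (List.mem_cons_of_mem _ hq)]),
        PySem.Dict.items_insert_of_not_contains d (f p) hfp,
        foldl_appendIf_acc (fun q => f q > 0) (fun q => (q.1, f q)) W ([] ++ [(p.1, f p)])]
      simp
    · rw [if_neg h, if_neg h]
      exact ih d hnd.2 (fun q hq => hfresh q (List.mem_cons_of_mem _ hq))

-- literal facts about pvWeights
theorem pvWeights_keys_nodup : (pvWeights.map Prod.fst).Nodup := by decide
theorem pvWeights_tags_nodup : ∀ p ∈ pvWeights, p.2.Nodup := by decide

-- per-recipe score equality
theorem score_eq (goals : List String) (p : String × List String) (hp : p ∈ pvWeights) :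
    ((PySem.Set.inter
        (goals.foldl (fun gt goal =>
          pvWeights.foldl (fun gt q =>
            q.2.foldl (fun gt tag =>
              if PySem.Str.isIn tag (PySem.Str.lower goal) then PySem.Set.add gt tag else gt) gt) gt)
          PySem.Set.empty) p.2).length : Int)
      = ((p.2.filter (fun t => (goals.map PySem.Str.lower).any (fun g => PySem.Str.isIn t g))).length : Int) := by
  have hs := nodup_goal_tags goals PySem.Set.empty (by simp [PySem.Set.empty])
  rw [inter_length_eq _ _ hs (pvWeights_tags_nodup p hp)]
  congr 2
  apply List.filter_congr
  intro t ht
  rw [List.any_map]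
  have hiff := mem_goal_tags goals PySem.Set.empty t
  have hex : ∃ q ∈ pvWeights, t ∈ q.2 := ⟨p, hp, ht⟩
  cases hany : goals.any ((fun g => PySem.Str.isIn t g) ∘ PySem.Str.lower) with
  | true =>
    have hany' : (goals.any fun g => PySem.Str.isIn t (PySem.Str.lower g)) = true := hany
    simp only [decide_eq_true_eq]
    exact hiff.mpr (Or.inr ⟨hex, hany'⟩)
  | false =>
    have hany' : (goals.any fun g => PySem.Str.isIn t (PySem.Str.lower g)) = false := hany
    simp only [decide_eq_false_iff_not]
    intro hm
    rcases hiff.mp hm with h | ⟨-, h⟩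
    · exact absurd h (by simp [PySem.Set.empty])
    · rw [hany'] at h; cases h

-- B's per-recipe score as a named function (proof-side only)
def pvScoreB (goals : List String) (p : String × List String) : Int :=
  ((p.2.filter (fun t => (goals.map PySem.Str.lower).any (fun g => PySem.Str.isIn t g))).length : Int)

-- ===== VERDICT (by name: the statement is the Claim_ definition above) =====
theorem score_recipe_against_goals_spec : Claim_equal_score_recipe_against_goals := by
  intro goals _
  show score_recipe_against_goals goals = score_recipe_against_goals_alt goals
  have h1 : score_recipe_against_goals goals
      = (List.foldl (fun sc (p : String × List String) =>
          if pvScoreB goals p > 0 then sc.insert p.1 (pvScoreB goals p) else sc)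
          PySem.Dict.empty pvWeights).items := by
    refine congrArg PySem.Dict.items ?_
    refine PySem.List.foldl_congr_mem pvWeights _ _ PySem.Dict.empty ?_
    intro sc p hp
    simp only [pvScoreB, score_eq goals p hp]
  have h2 : (List.foldl (fun sc (p : String × List String) =>
          if pvScoreB goals p > 0 then sc.insert p.1 (pvScoreB goals p) else sc)
          PySem.Dict.empty pvWeights).items
      = score_recipe_against_goals_alt goals := by
    rw [items_foldl_insertIf (pvScoreB goals) pvWeights PySem.Dict.empty pvWeights_keys_nodup
          (fun q _ => PySem.Dict.contains_empty q.1)]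
    rfl
  exact h1.trans h2
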